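-- pv_equiv track=rewrite | github.com/LogicPy/Python | Chess/Shredder_engine2.py | is_king_captured
-- ===== SOURCE A (Python) =====
-- def is_king_captured(board):
--     # Assuming 'wK' for White King and 'bK' for Black King
--     white_king_present = any('wK' in row for row in board)
--     black_king_present = any('bK' in row for row in board)
--
--     if not white_king_present:
--         return 'Black wins by capturing the White King!'
--     elif not black_king_present:
--         return 'White wins by capturing the Black King!'
--     else:
--         return None  # No king has been captured
-- ===== SOURCE B (Python) =====
-- def is_king_captured(board):
--     white = False
--     black = False
--     for row in board:
--         if 'wK' in row:
--             white = True
--         if 'bK' in row: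
--             black = True
--         if white and black:
--             break
--     if not white:
--         return 'Black wins by capturing the White King!'
--     elif not black:
--         return 'White wins by capturing the Black King!'
--     else:
--         return None
-- ===== Notes on version B (the rewrite author's own statement) =====
-- stated objective: simpler
-- what changed: Replaces the two separate any(...) scans over the board with a single pass that maintains two booleans and breaks early once both kings are found.
import Mathlib
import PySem

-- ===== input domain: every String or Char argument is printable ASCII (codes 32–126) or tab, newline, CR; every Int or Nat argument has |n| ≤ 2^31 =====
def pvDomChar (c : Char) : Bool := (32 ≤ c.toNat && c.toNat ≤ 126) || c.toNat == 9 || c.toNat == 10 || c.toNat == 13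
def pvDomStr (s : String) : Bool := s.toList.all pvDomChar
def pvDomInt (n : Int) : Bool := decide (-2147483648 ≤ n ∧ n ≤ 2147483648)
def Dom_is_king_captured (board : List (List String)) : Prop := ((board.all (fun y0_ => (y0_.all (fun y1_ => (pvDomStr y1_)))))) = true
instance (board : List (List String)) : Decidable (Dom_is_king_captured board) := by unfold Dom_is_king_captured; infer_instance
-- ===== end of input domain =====

-- B replaces A's two separate any(...) scans with one pass keeping two booleans (early break); objective: simpler.

-- ===== PORT A =====
def is_king_captured (board : List (List String)) : Option String :=
  let white_king_present := board.any (fun row => row.contains "wK")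
  let black_king_present := board.any (fun row => row.contains "bK")
  if !white_king_present then
    some "Black wins by capturing the White King!"
  else if !black_king_present then
    some "White wins by capturing the Black King!"
  else
    none

-- ===== PORT B =====
-- the single loop of Source B: state (white, black), break once both are true
def pvScanKings : List (List String) → Bool → Bool → Bool × Bool
  | [], w, b => (w, b)
  | row :: rest, w, b =>
    let w' := if row.contains "wK" then true else w
    let b' := if row.contains "bK" then true else b
    if w' && b' then (w', b') else pvScanKings rest w' b'

def is_king_captured_alt (board : List (List String)) : Option String :=
  let wb := pvScanKings board false false
  if !wb.1 then
    some "Black wins by capturing the White King!"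
  else if !wb.2 then
    some "White wins by capturing the Black King!"
  else
    none

-- ===== PRECONDITION & SPEC =====
def Spec_is_king_captured (board : List (List String)) (out : Option String) : Prop := out = is_king_captured_alt board
instance (board : List (List String)) (out : Option String) : Decidable (Spec_is_king_captured board out) := by unfold Spec_is_king_captured; infer_instance

-- ===== CLAIM (what is proved, stated in full; the proofs are below) =====
def Claim_equal_is_king_captured : Prop := ∀ (board : List (List String)), Dom_is_king_captured board → Spec_is_king_captured board (is_king_captured board)

-- ===== LEMMAS AND PROOFS =====
theorem pvScanKings_eq (l : List (List String)) (w b : Bool) :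
    pvScanKings l w b = (w || l.any (fun row => row.contains "wK"),
                         b || l.any (fun row => row.contains "bK")) := by
  induction l generalizing w b with
  | nil => simp [pvScanKings]
  | cons row rest ih =>
    simp only [pvScanKings, List.any_cons]
    cases w <;> cases b <;> split_ifs <;> simp_all [ih]

-- ===== VERDICT (by name: the statement is the Claim_ definition above) =====
theorem is_king_captured_spec : Claim_equal_is_king_captured := by
  intro board _
  unfold Spec_is_king_captured is_king_captured is_king_captured_alt
  rw [pvScanKings_eq]
  simp
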